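-- pv_equiv track=rewrite | github.com/Garl4nd/Exercises | Sorts/team_photo.py | photographable
-- ===== SOURCE A (Python) =====
-- import itertools as it
--
-- def photographable(team1,team2):
--     sorted_players=sorted((height,team) for height,team in it.chain(zip(team1,[1]*len(team1)),zip(team2,[2]*len(team2))))
--     left=0
--     trial_teams=1,2
--     for trial_team in trial_teams:
--         for height, team in sorted_players:
--             if team==trial_team:
--                 left+=1
--             else:
--                 left-=1
--             if left<0:
--                 break
--         else:
--             return True,trial_team
--     return False,0
-- ===== SOURCE B (Python) =====
-- def photographable(team1, team2):
--     players = sorted([(h, 1) for h in team1] + [(h, 2) for h in team2])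
--     b = mn = mx = 0
--     for _, team in players:
--         b += 1 if team == 1 else -1
--         mn = min(mn, b)
--         mx = max(mx, b)
--     if mn >= 0:
--         return True, 1
--     if mx <= 0:
--         return True, 2
--     return False, 0
-- ===== Notes on version B (the rewrite author's own statement) =====
-- stated objective: simpler
-- what changed: B replaces A's two early-breaking scans (with loop state leaking between them) by a single pass over the sorted tagged list that tracks the running balance's prefix min and max, deciding the answer from those two numbers.
-- intended difference: On inputs where, in (height,team)-sorted order, the running balance (+1 for team 1, -1 for team 2) dips below 0, never exceeds 0, and hits exactly 0 at some prefix, A returns (False, 0) because it carries left=-1 from the failed team-1 trial into the team-2 trial, while B returns (True, 2), the intended answer since team 2 can then stand in front (e.g. team1=[2], team2=[1]). — e.g. on photographable([2], [1]): A returns (false, 0), B returns (true, 2)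
import Mathlib
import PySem

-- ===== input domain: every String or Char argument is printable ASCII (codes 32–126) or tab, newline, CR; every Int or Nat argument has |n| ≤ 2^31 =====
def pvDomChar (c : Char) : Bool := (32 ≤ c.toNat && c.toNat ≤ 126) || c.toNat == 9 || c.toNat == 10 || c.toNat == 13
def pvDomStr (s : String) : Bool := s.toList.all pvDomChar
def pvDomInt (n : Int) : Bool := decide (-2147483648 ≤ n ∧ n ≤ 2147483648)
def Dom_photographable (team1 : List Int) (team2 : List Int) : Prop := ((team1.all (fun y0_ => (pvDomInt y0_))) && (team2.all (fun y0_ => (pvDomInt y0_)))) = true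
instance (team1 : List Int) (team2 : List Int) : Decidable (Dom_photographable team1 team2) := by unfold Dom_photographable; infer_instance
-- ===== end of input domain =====

-- B fuses A's two early-breaking scans into one prefix-min/max pass (objective: simpler);
-- on D_ inputs A's leaked loop state yields (False,0) where B returns the intended (True,2).

-- B fuses A's two early-breaking scans into one prefix-min/max pass (objective: simpler);
-- on D_ inputs A's leaked loop state yields (False,0) where B returns the intended (True,2).

-- ===== PORT A =====
-- the merged tagged list (zip team1 with 1s, team2 with 2s) that A sorts by the (height, team) tuple
def pvPlayers (team1 : List Int) (team2 : List Int) : List (Int × Int) :=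
  PySem.List.sorted2 (team1.map (fun h => (h, (1 : Int))) ++ team2.map (fun h => (h, (2 : Int)))) (fun p => p.1) (fun p => p.2)

-- A's inner 'for … else' loop: returns (broke?, left after the loop)
def pvInner (ps : List (Int × Int)) (trial : Int) (left : Int) : Bool × Int :=
  match ps with
  | [] => (false, left)
  | (_, team) :: rest =>
    let left' := if team == trial then left + 1 else left - 1
    if left' < 0 then (true, left') else pvInner rest trial left'

def photographable (team1 : List Int) (team2 : List Int) : Bool × Int :=
  let sorted_players := pvPlayers team1 team2
  -- trial_teams = 1, 2 : the outer loop unrolled; 'left' carries over between the trials as in A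
  match pvInner sorted_players 1 0 with
  | (false, _) => (true, 1)
  | (true, left) =>
    match pvInner sorted_players 2 left with
    | (false, _) => (true, 2)
    | (true, _) => (false, 0)

-- ===== PORT B =====
def pvStep (s : Int × Int × Int) (p : Int × Int) : Int × Int × Int :=
  let b := s.1 + (if p.2 == 1 then 1 else -1)
  (b, min s.2.1 b, max s.2.2 b)

def photographable_alt (team1 : List Int) (team2 : List Int) : Bool × Int :=
  let players := PySem.List.sorted2 (team1.map (fun h => (h, (1 : Int))) ++ team2.map (fun h => (h, (2 : Int)))) (fun p => p.1) (fun p => p.2)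
  let r := players.foldl pvStep (0, 0, 0)
  if 0 ≤ r.2.1 then (true, 1)
  else if r.2.2 ≤ 0 then (true, 2)
  else (false, 0)

-- ===== PRECONDITION & SPEC =====
-- counts on the raw input: how many entries of xs are ≤ h (resp. < h)
def pvCLe (xs : List Int) (h : Int) : Nat := xs.countP (fun x => decide (x ≤ h))
def pvCLt (xs : List Int) (h : Int) : Nat := xs.countP (fun x => decide (x < h))

-- On inputs where team 2 outnumbers team 1 below some team-2 height, yet every team-1 player has
-- strictly more shorter team-2 players than team-1 players up to his height, with equality attained,
-- A returns (False,0) (it carries left=-1 from the failed team-1 trial into the team-2 trial)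
-- while B returns (True,2), the intended answer since team 2 can stand in front.
def D_photographable (team1 : List Int) (team2 : List Int) : Prop :=
  (∃ h ∈ team2, pvCLe team1 h < pvCLe team2 h) ∧
  (∀ h ∈ team1, pvCLe team1 h ≤ pvCLt team2 h) ∧
  (∃ h ∈ team1, pvCLe team1 h = pvCLt team2 h)
instance (team1 : List Int) (team2 : List Int) : Decidable (D_photographable team1 team2) := by unfold D_photographable; infer_instance

def Spec_photographable (team1 : List Int) (team2 : List Int) (out : Bool × Int) : Prop := ¬ D_photographable team1 team2 → out = photographable_alt team1 team2
instance (team1 : List Int) (team2 : List Int) (out : Bool × Int) : Decidable (Spec_photographable team1 team2 out) := by unfold Spec_photographable; infer_instance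

def pvDiffWitness_photographable : List Int × List Int := ([2], [1])
def pvDiffWitnessOut_photographable : (Bool × Int) × (Bool × Int) := ((false, 0), (true, 2))

-- ===== CLAIM (what is proved, stated in full; the proofs are below) =====
def Claim_unchanged_photographable : Prop := ∀ (team1 : List Int) (team2 : List Int), Dom_photographable team1 team2 → Spec_photographable team1 team2 (photographable team1 team2)
def Claim_changed_photographable : Prop := Dom_photographable (pvDiffWitness_photographable.1) (pvDiffWitness_photographable.2) ∧ D_photographable (pvDiffWitness_photographable.1) (pvDiffWitness_photographable.2) ∧ photographable (pvDiffWitness_photographable.1) (pvDiffWitness_photographable.2) = pvDiffWitnessOut_photographable.1 ∧ photographable_alt (pvDiffWitness_photographable.1) (pvDiffWitness_photographable.2) = pvDiffWitnessOut_photographable.2 ∧ pvDiffWitnessOut_photographable.1 ≠ pvDiffWitnessOut_photographable.2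
def Claim_exact_photographable : Prop := ∀ (team1 : List Int) (team2 : List Int), Dom_photographable team1 team2 → D_photographable team1 team2 → photographable team1 team2 ≠ photographable_alt team1 team2

-- ===== LEMMAS AND PROOFS =====

-- the running balances of a tagged list (one entry per nonempty prefix), used only by the proofs
def pvBals (acc : Int) : List (Int × Int) → List Int
  | [] => []
  | (_, t) :: rest => (acc + (if t == 1 then 1 else -1)) :: pvBals (acc + (if t == 1 then 1 else -1)) rest

theorem pvBals_cons (a h t : Int) (tl : List (Int × Int)) :
    pvBals a ((h, t) :: tl) = (a + (if t == 1 then 1 else -1)) :: pvBals (a + (if t == 1 then 1 else -1)) tl := rfl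

theorem pvInner_cons (h t trial l : Int) (tl : List (Int × Int)) :
    pvInner ((h, t) :: tl) trial l =
      if (t == trial) = true then (if l + 1 < 0 then (true, l + 1) else pvInner tl trial (l + 1))
      else (if l - 1 < 0 then (true, l - 1) else pvInner tl trial (l - 1)) := by
  by_cases ht : (t == trial) = true <;> simp [pvInner, ht]

-- trial 1: the inner loop completes iff every running balance stays within l of its start
theorem pvInner1_ok : ∀ (ps : List (Int × Int)) (a l : Int), 0 ≤ l →
    (∀ b ∈ pvBals a ps, a - b ≤ l) → ∃ v, pvInner ps 1 l = (false, v) := by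
  intro ps
  induction ps with
  | nil => intro a l _ _; exact ⟨l, rfl⟩
  | cons hd tl ih =>
    intro a l hl hall
    obtain ⟨h, t⟩ := hd
    rw [pvBals_cons] at hall
    have hhead := hall _ (List.mem_cons_self)
    have htail := fun b hb => hall b (List.mem_cons_of_mem _ hb)
    rw [pvInner_cons]
    by_cases ht : (t == 1) = true
    · rw [if_pos ht] at hhead ⊢
      rw [if_pos ht] at htail
      have hnb : ¬ (l + 1 < 0) := by omega
      rw [if_neg hnb]
      exact ih (a + 1) (l + 1) (by omega) (by intro b hb; have := htail b hb; omega)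
    · rw [if_neg ht] at hhead ⊢
      rw [if_neg ht] at htail
      have hnb : ¬ (l - 1 < 0) := by omega
      rw [if_neg hnb]
      exact ih (a + -1) (l - 1) (by omega) (by intro b hb; have := htail b hb; omega)

-- trial 1: the inner loop breaks with left = -1 as soon as some balance dips more than l below start
theorem pvInner1_break : ∀ (ps : List (Int × Int)) (a l : Int), 0 ≤ l →
    (∃ b ∈ pvBals a ps, a - b > l) → pvInner ps 1 l = (true, -1) := by
  intro ps
  induction ps with
  | nil => intro a l _ hex; simp [pvBals] at hex
  | cons hd tl ih =>
    intro a l hl hex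
    obtain ⟨h, t⟩ := hd
    rw [pvBals_cons] at hex
    obtain ⟨b, hb, hgt⟩ := hex
    rw [pvInner_cons]
    by_cases ht : (t == 1) = true
    · rw [if_pos ht]
      rw [if_pos ht] at hb
      have hnb : ¬ (l + 1 < 0) := by omega
      rw [if_neg hnb]
      rcases List.mem_cons.mp hb with rfl | hb
      · omega
      · exact ih (a + 1) (l + 1) (by omega) ⟨b, hb, by omega⟩
    · rw [if_neg ht]
      rw [if_neg ht] at hb
      by_cases hbr : l - 1 < 0
      · rw [if_pos hbr]
        have hlm : l - 1 = -1 := by omega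
        rw [hlm]
      · rw [if_neg hbr]
        rcases List.mem_cons.mp hb with rfl | hb
        · omega
        · exact ih (a + -1) (l - 1) (by omega) ⟨b, hb, by omega⟩

-- trial 2 (teams are 1 or 2): completes iff every balance stays at most l above its start
theorem pvInner2_iff : ∀ (ps : List (Int × Int)) (a l : Int), (∀ p ∈ ps, p.2 = 1 ∨ p.2 = 2) →
    ((pvInner ps 2 l).1 = false ↔ ∀ b ∈ pvBals a ps, b - a ≤ l) := by
  intro ps
  induction ps with
  | nil => intro a l _; simp [pvInner, pvBals]
  | cons hd tl ih =>
    intro a l hteams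
    obtain ⟨h, t⟩ := hd
    have ht12 : t = 1 ∨ t = 2 := hteams (h, t) List.mem_cons_self
    have htl : ∀ p ∈ tl, p.2 = 1 ∨ p.2 = 2 := fun p hp => hteams p (List.mem_cons_of_mem _ hp)
    rw [pvBals_cons, pvInner_cons]
    rcases ht12 with rfl | rfl
    · rw [if_neg (show ¬ ((1 : Int) == 2) = true by decide),
         if_pos (show ((1 : Int) == 1) = true by decide)]
      by_cases hbr : l - 1 < 0
      · rw [if_pos hbr]
        constructor
        · intro hc; simp at hc
        · intro hall
          exfalso
          have := hall _ List.mem_cons_self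
          omega
      · rw [if_neg hbr]
        rw [ih (a + 1) (l - 1) htl]
        constructor
        · intro hall b hb
          rcases List.mem_cons.mp hb with rfl | hb
          · omega
          · have := hall b hb; omega
        · intro hall b hb
          have := hall b (List.mem_cons_of_mem _ hb); omega
    · rw [if_pos (show ((2 : Int) == 2) = true by decide),
         if_neg (show ¬ ((2 : Int) == 1) = true by decide)]
      by_cases hbr : l + 1 < 0
      · rw [if_pos hbr]
        constructor
        · intro hc; simp at hc
        · intro hall
          exfalso
          have := hall _ List.mem_cons_self
          omega
      · rw [if_neg hbr]
        rw [ih (a + -1) (l + 1) htl]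
        constructor
        · intro hall b hb
          rcases List.mem_cons.mp hb with rfl | hb
          · omega
          · have := hall b hb; omega
        · intro hall b hb
          have := hall b (List.mem_cons_of_mem _ hb); omega

-- B's fold: the prefix-min component
theorem pvFold_mn_iff : ∀ (ps : List (Int × Int)) (b mn mx c : Int),
    (c ≤ (ps.foldl pvStep (b, mn, mx)).2.1) ↔ (c ≤ mn ∧ ∀ x ∈ pvBals b ps, c ≤ x) := by
  intro ps
  induction ps with
  | nil => intro b mn mx c; simp [pvBals]
  | cons hd tl ih =>
    intro b mn mx c
    obtain ⟨h, t⟩ := hd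
    rw [pvBals_cons]
    simp only [List.foldl_cons, pvStep]
    rw [ih]
    constructor
    · rintro ⟨h1, h2⟩
      refine ⟨by omega, ?_⟩
      intro x hx
      rcases List.mem_cons.mp hx with rfl | hx
      · omega
      · exact h2 x hx
    · rintro ⟨h1, h2⟩
      have hh := h2 _ List.mem_cons_self
      exact ⟨by omega, fun x hx => h2 x (List.mem_cons_of_mem _ hx)⟩

-- B's fold: the prefix-max component
theorem pvFold_mx_iff : ∀ (ps : List (Int × Int)) (b mn mx c : Int),
    ((ps.foldl pvStep (b, mn, mx)).2.2 ≤ c) ↔ (mx ≤ c ∧ ∀ x ∈ pvBals b ps, x ≤ c) := by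
  intro ps
  induction ps with
  | nil => intro b mn mx c; simp [pvBals]
  | cons hd tl ih =>
    intro b mn mx c
    obtain ⟨h, t⟩ := hd
    rw [pvBals_cons]
    simp only [List.foldl_cons, pvStep]
    rw [ih]
    constructor
    · rintro ⟨h1, h2⟩
      refine ⟨by omega, ?_⟩
      intro x hx
      rcases List.mem_cons.mp hx with rfl | hx
      · omega
      · exact h2 x hx
    · rintro ⟨h1, h2⟩
      have hh := h2 _ List.mem_cons_self
      exact ⟨by omega, fun x hx => h2 x (List.mem_cons_of_mem _ hx)⟩

-- ---- the (height, team)-lexicographic order produced by the sort ----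

def pvLeP (a b : Int × Int) : Prop := a.1 < b.1 ∨ (a.1 = b.1 ∧ a.2 ≤ b.2)

def pvLtB (a b : Int × Int) : Bool := decide (a.1 < b.1) || (!decide (b.1 < a.1) && decide (a.2 < b.2))

theorem pvLtB_false_iff (a b : Int × Int) : pvLtB a b = false ↔ pvLeP b a := by
  simp only [pvLtB, pvLeP, Bool.or_eq_false_iff, Bool.and_eq_false_iff, decide_eq_false_iff_not,
    Bool.not_eq_false', decide_eq_true_eq]
  omega

theorem pvLtB_true_le (a b : Int × Int) (h : pvLtB a b = true) : pvLeP a b := by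
  simp only [pvLtB, Bool.or_eq_true, Bool.and_eq_true, decide_eq_true_eq,
    Bool.not_eq_true', decide_eq_false_iff_not] at h
  unfold pvLeP
  omega

theorem pvLeP_refl (a : Int × Int) : pvLeP a a := by unfold pvLeP; omega

theorem pvLeP_trans {a b c : Int × Int} (h1 : pvLeP a b) (h2 : pvLeP b c) : pvLeP a c := by
  unfold pvLeP at *; omega

theorem pvInsertBy_pairwise (x : Int × Int) (ys : List (Int × Int)) (hys : ys.Pairwise pvLeP) :
    (PySem.List.insertBy pvLtB x ys).Pairwise pvLeP := by
  induction ys with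
  | nil => simp [PySem.List.insertBy]
  | cons y ys ih =>
    rcases hys with _ | ⟨hy, hys⟩
    by_cases hxy : pvLtB x y = true
    · show (if pvLtB x y = true then x :: y :: ys else y :: PySem.List.insertBy pvLtB x ys).Pairwise pvLeP
      rw [if_pos hxy]
      refine List.Pairwise.cons ?_ (List.Pairwise.cons hy hys)
      intro z hz
      rcases List.mem_cons.mp hz with rfl | hz
      · exact pvLtB_true_le _ _ hxy
      · exact pvLeP_trans (pvLtB_true_le _ _ hxy) (hy z hz)
    · show (if pvLtB x y = true then x :: y :: ys else y :: PySem.List.insertBy pvLtB x ys).Pairwise pvLeP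
      rw [if_neg hxy]
      refine List.Pairwise.cons ?_ (ih hys)
      intro z hz
      rcases (PySem.List.mem_insertBy pvLtB x z ys).mp hz with rfl | hz
      · exact (pvLtB_false_iff _ _).mp (Bool.eq_false_iff.mpr hxy)
      · exact hy z hz

theorem pvFoldl_insertBy_pairwise : ∀ (xs acc : List (Int × Int)), acc.Pairwise pvLeP →
    (xs.foldl (fun acc x => PySem.List.insertBy pvLtB x acc) acc).Pairwise pvLeP := by
  intro xs
  induction xs with
  | nil => intro acc h; exact h
  | cons x xs ih =>
    intro acc h
    exact ih _ (pvInsertBy_pairwise x acc h)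

theorem pvPlayers_pairwise (team1 team2 : List Int) : (pvPlayers team1 team2).Pairwise pvLeP := by
  have : pvPlayers team1 team2 =
      (team1.map (fun h => (h, (1 : Int))) ++ team2.map (fun h => (h, (2 : Int)))).foldl
        (fun acc x => PySem.List.insertBy pvLtB x acc) [] := rfl
  rw [this]
  exact pvFoldl_insertBy_pairwise _ [] List.Pairwise.nil

theorem pvPlayers_perm (team1 team2 : List Int) :
    (pvPlayers team1 team2).Perm (team1.map (fun h => (h, (1 : Int))) ++ team2.map (fun h => (h, (2 : Int)))) :=
  PySem.List.sorted2_perm _ _ _ _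

theorem pvPlayers_teams (team1 team2 : List Int) :
    ∀ p ∈ pvPlayers team1 team2, p.2 = 1 ∨ p.2 = 2 := by
  intro p hp
  have hmem := (pvPlayers_perm team1 team2).mem_iff.mp hp
  simp only [List.mem_append, List.mem_map] at hmem
  rcases hmem with ⟨_, _, rfl⟩ | ⟨_, _, rfl⟩ <;> simp

theorem pvPlayers_tag1_mem (team1 team2 : List Int) (p : Int × Int)
    (hp : p ∈ pvPlayers team1 team2) (h1 : p.2 = 1) : p.1 ∈ team1 := by
  have hmem := (pvPlayers_perm team1 team2).mem_iff.mp hp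
  simp only [List.mem_append, List.mem_map] at hmem
  rcases hmem with ⟨x, hx, rfl⟩ | ⟨x, hx, rfl⟩
  · exact hx
  · simp at h1

theorem pvPlayers_tag2_mem (team1 team2 : List Int) (p : Int × Int)
    (hp : p ∈ pvPlayers team1 team2) (h2 : p.2 = 2) : p.1 ∈ team2 := by
  have hmem := (pvPlayers_perm team1 team2).mem_iff.mp hp
  simp only [List.mem_append, List.mem_map] at hmem
  rcases hmem with ⟨x, hx, rfl⟩ | ⟨x, hx, rfl⟩
  · simp at h2
  · exact hx

-- ---- counting the sorted list via counts on the raw teams ----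

theorem pvPlayers_countP (team1 team2 : List Int) (q : Int × Int → Bool) :
    (pvPlayers team1 team2).countP q = team1.countP (fun x => q (x, 1)) + team2.countP (fun x => q (x, 2)) := by
  rw [(pvPlayers_perm team1 team2).countP_eq]
  rw [List.countP_append, List.countP_map, List.countP_map]
  rfl

theorem pvK1 (team1 team2 : List Int) (h : Int) :
    (pvPlayers team1 team2).countP (fun p => p.2 == 1 && decide (p.1 ≤ h)) = pvCLe team1 h := by
  rw [pvPlayers_countP]
  unfold pvCLe
  simp

theorem pvK2 (team1 team2 : List Int) (h : Int) :
    (pvPlayers team1 team2).countP (fun p => !(p.2 == 1) && decide (p.1 < h)) = pvCLt team2 h := by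
  rw [pvPlayers_countP]
  unfold pvCLt
  simp

theorem pvK3 (team1 team2 : List Int) (h : Int) :
    (pvPlayers team1 team2).countP (fun p => !(p.2 == 1) && decide (p.1 ≤ h)) = pvCLe team2 h := by
  rw [pvPlayers_countP]
  unfold pvCLe
  simp

theorem pvK4 (team1 team2 : List Int) (h : Int) :
    (pvPlayers team1 team2).countP (fun p => p.2 == 1 && decide (p.1 < h)) = pvCLt team1 h := by
  rw [pvPlayers_countP]
  unfold pvCLt
  simp

-- ---- prefixes of the sorted list ----

def pvCnt (l : List (Int × Int)) : Int :=
  (l.countP (fun p => p.2 == 1) : Int) - (l.countP (fun p => !(p.2 == 1)) : Int)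

theorem pvCnt_cons (p : Int × Int) (l : List (Int × Int)) :
    pvCnt (p :: l) = (if (p.2 == 1) = true then 1 else -1) + pvCnt l := by
  by_cases h : (p.2 == 1) = true <;>
    simp [pvCnt, List.countP_cons, h] <;> push_cast <;> ring

theorem pvBals_mem_iff : ∀ (l : List (Int × Int)) (a b : Int),
    b ∈ pvBals a l ↔ ∃ n, n < l.length ∧ b = a + pvCnt (l.take (n + 1)) := by
  intro l
  induction l with
  | nil => intro a b; simp [pvBals]
  | cons hd tl ih =>
    intro a b
    obtain ⟨h, t⟩ := hd
    rw [pvBals_cons]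
    constructor
    · intro hb
      rcases List.mem_cons.mp hb with rfl | hb
      · refine ⟨0, by simp, ?_⟩
        rw [show ((h, t) :: tl).take 1 = [(h, t)] from rfl, pvCnt_cons,
          show pvCnt ([] : List (Int × Int)) = 0 from rfl]
        by_cases ht : (t == 1) = true
        · rw [if_pos ht]; omega
        · rw [if_neg ht]; omega
      · obtain ⟨n, hn, hbv⟩ := (ih _ _).mp hb
        refine ⟨n + 1, by simpa using hn, ?_⟩
        rw [List.take_succ_cons, pvCnt_cons]
        by_cases ht : (t == 1) = true
        · rw [if_pos ht] at hbv ⊢; omega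
        · rw [if_neg ht] at hbv ⊢; omega
    · rintro ⟨n, hn, hbv⟩
      rcases n with _ | m
      · apply List.mem_cons.mpr
        left
        rw [hbv]
        rw [show ((h, t) :: tl).take 1 = [(h, t)] from rfl, pvCnt_cons,
          show pvCnt ([] : List (Int × Int)) = 0 from rfl]
        by_cases ht : (t == 1) = true
        · rw [if_pos ht]; omega
        · rw [if_neg ht]; omega
      · apply List.mem_cons.mpr
        right
        apply (ih _ _).mpr
        refine ⟨m, by simpa using hn, ?_⟩
        rw [List.take_succ_cons, pvCnt_cons] at hbv
        by_cases ht : (t == 1) = true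
        · rw [if_pos ht] at hbv ⊢; omega
        · rw [if_neg ht] at hbv ⊢; omega

theorem pvSorted_take_drop : ∀ (l : List (Int × Int)), l.Pairwise pvLeP → ∀ n (hn : n < l.length),
    (∀ p ∈ l.take (n + 1), pvLeP p l[n]) ∧ (∀ p ∈ l.drop (n + 1), pvLeP l[n] p) := by
  intro l
  induction l with
  | nil => intro _ n hn; simp at hn
  | cons x tl ih =>
    intro hpair n hn
    rcases hpair with _ | ⟨hx, htl⟩
    rcases n with _ | m
    · constructor
      · intro p hp
        simp at hp
        subst hp
        exact pvLeP_refl _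
      · intro p hp
        simp only [List.drop_succ_cons, List.drop_zero] at hp
        exact hx p hp
    · have hm : m < tl.length := by simpa using hn
      obtain ⟨h1, h2⟩ := ih htl m hm
      constructor
      · intro p hp
        rcases List.mem_cons.mp (by simpa using hp) with rfl | hp2
        · exact hx _ (List.getElem_mem hm)
        · exact h1 p hp2
      · intro p hp
        exact h2 p (by simpa using hp)

theorem pvCountP_take_eq (l : List (Int × Int)) (n : Nat) (q : Int × Int → Bool)
    (h0 : ∀ p ∈ l.drop n, ¬ q p = true) : (l.take n).countP q = l.countP q := by
  conv_rhs => rw [← List.take_append_drop n l]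
  rw [List.countP_append, List.countP_eq_zero.mpr h0]
  omega

theorem pvCountP_take_le (l : List (Int × Int)) (n : Nat) (q : Int × Int → Bool) :
    (l.take n).countP q ≤ l.countP q :=
  (List.take_sublist n l).countP_le

-- the cut just after all elements ≤lex c (c a member of the sorted list)
theorem pvCut_exists : ∀ (l : List (Int × Int)), l.Pairwise pvLeP → ∀ c : Int × Int,
    (∃ p ∈ l, pvLeP p c) → ∃ n, n < l.length ∧
      (∀ p ∈ l.take (n + 1), pvLeP p c) ∧ (∀ p ∈ l.drop (n + 1), ¬ pvLeP p c) := by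
  intro l
  induction l with
  | nil => intro _ c hex; simp at hex
  | cons x tl ih =>
    intro hpair c hex
    rcases hpair with _ | ⟨hx, htl⟩
    by_cases hex2 : ∃ p ∈ tl, pvLeP p c
    · obtain ⟨n, hn, h1, h2⟩ := ih htl c hex2
      refine ⟨n + 1, by simpa using hn, ?_, ?_⟩
      · intro p hp
        rcases List.mem_cons.mp (by simpa using hp) with rfl | hp2
        · obtain ⟨w, hw, hwc⟩ := hex2
          exact pvLeP_trans (hx w hw) hwc
        · exact h1 p hp2
      · intro p hp
        exact h2 p (by simpa using hp)
    · refine ⟨0, by simp, ?_, ?_⟩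
      · intro p hp
        simp at hp
        subst hp
        obtain ⟨w, hw, hwc⟩ := hex
        rcases List.mem_cons.mp hw with rfl | hw2
        · exact hwc
        · exact pvLeP_trans (hx w hw2) hwc
      · intro p hp
        simp only [List.drop_succ_cons, List.drop_zero] at hp
        exact fun hc => hex2 ⟨p, hp, hc⟩

-- maximal element of a list satisfying a property
theorem pvExists_max : ∀ (xs : List Int) (P : Int → Prop), (∃ x ∈ xs, P x) →
    ∃ x0 ∈ xs, P x0 ∧ ∀ y ∈ xs, P y → y ≤ x0 := by
  intro xs
  induction xs with
  | nil => intro P hex; simp at hex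
  | cons x tl ih =>
    intro P hex
    by_cases hex2 : ∃ y ∈ tl, P y
    · obtain ⟨x0, hx0m, hx0P, hmax⟩ := ih P hex2
      by_cases hx : P x ∧ x0 ≤ x
      · refine ⟨x, List.mem_cons_self, hx.1, ?_⟩
        intro y hy hPy
        rcases List.mem_cons.mp hy with rfl | hy2
        · omega
        · have := hmax y hy2 hPy; omega
      · refine ⟨x0, List.mem_cons_of_mem _ hx0m, hx0P, ?_⟩
        intro y hy hPy
        rcases List.mem_cons.mp hy with rfl | hy2
        · by_cases hPx : y ≤ x0
          · omega
          · exact absurd ⟨hPy, by omega⟩ hx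
        · exact hmax y hy2 hPy
    · obtain ⟨w, hw, hwP⟩ := hex
      rcases List.mem_cons.mp hw with rfl | hw2
      · refine ⟨w, List.mem_cons_self, hwP, ?_⟩
        intro y hy hPy
        rcases List.mem_cons.mp hy with rfl | hy2
        · omega
        · exact absurd ⟨y, hy2, hPy⟩ hex2
      · exact absurd ⟨w, hw2, hwP⟩ hex2

-- if every team-1 height satisfies the Hall bound, so does every height (or team1 has nothing below it)
theorem pvCle_all (team1 team2 : List Int)
    (hyp : ∀ h ∈ team1, pvCLe team1 h ≤ pvCLt team2 h) :
    ∀ h : Int, pvCLe team1 h ≤ pvCLt team2 h ∨ pvCLe team1 h = 0 := by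
  intro h
  by_cases hne : ∃ x ∈ team1, x ≤ h
  · left
    obtain ⟨x0, hx0m, hx0le, hmax⟩ := pvExists_max team1 (· ≤ h) hne
    have e1 : pvCLe team1 h = pvCLe team1 x0 := by
      unfold pvCLe
      apply List.countP_congr
      intro a ha
      have := hmax a ha
      by_cases h1 : a ≤ h <;> by_cases h2 : a ≤ x0 <;> simp [h1, h2] <;> omega
    have e2 : pvCLt team2 x0 ≤ pvCLt team2 h := by
      unfold pvCLt
      apply List.countP_mono_left
      intro a _ ha
      simp only [decide_eq_true_eq] at *
      omega
    have := hyp x0 hx0m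
    omega
  · right
    unfold pvCLe
    apply List.countP_eq_zero.mpr
    intro a ha
    simp only [decide_eq_true_eq]
    intro hle
    exact hne ⟨a, ha, hle⟩

-- ---- the four bridges between balances of the sorted list and counts on the input ----

-- the balance at the cut after all elements ≤lex (h,1), h ∈ team1
theorem pvBridgeA (team1 team2 : List Int) :
    ∀ h ∈ team1, ((pvCLe team1 h : Int) - (pvCLt team2 h : Int)) ∈ pvBals 0 (pvPlayers team1 team2) := by
  intro h hh
  have hpair := pvPlayers_pairwise team1 team2
  have hteams := pvPlayers_teams team1 team2
  have hc : ((h, (1 : Int)) : Int × Int) ∈ pvPlayers team1 team2 := by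
    apply (pvPlayers_perm team1 team2).mem_iff.mpr
    simp only [List.mem_append, List.mem_map]
    exact Or.inl ⟨h, hh, rfl⟩
  obtain ⟨n, hn, h1, h2⟩ := pvCut_exists (pvPlayers team1 team2) hpair (h, 1) ⟨_, hc, pvLeP_refl _⟩
  apply (pvBals_mem_iff (pvPlayers team1 team2) 0 _).mpr
  refine ⟨n, hn, ?_⟩
  have e1 : ((pvPlayers team1 team2).take (n + 1)).countP (fun p => p.2 == 1) = pvCLe team1 h := by
    rw [show ((pvPlayers team1 team2).take (n + 1)).countP (fun p => p.2 == 1) =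
        ((pvPlayers team1 team2).take (n + 1)).countP (fun p => p.2 == 1 && decide (p.1 ≤ h)) from
      List.countP_congr (by
        intro p hp
        have := h1 p hp
        unfold pvLeP at this
        by_cases hq : (p.2 == 1) = true <;> simp [hq] <;> omega)]
    rw [pvCountP_take_eq (pvPlayers team1 team2) (n + 1) _ (by
      intro p hp hq
      simp only [Bool.and_eq_true, beq_iff_eq, decide_eq_true_eq] at hq
      exact h2 p hp (by unfold pvLeP; omega))]
    exact pvK1 team1 team2 h
  have e2 : ((pvPlayers team1 team2).take (n + 1)).countP (fun p => !(p.2 == 1)) = pvCLt team2 h := by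
    rw [show ((pvPlayers team1 team2).take (n + 1)).countP (fun p => !(p.2 == 1)) =
        ((pvPlayers team1 team2).take (n + 1)).countP (fun p => !(p.2 == 1) && decide (p.1 < h)) from
      List.countP_congr (by
        intro p hp
        have hle := h1 p hp
        have ht := hteams p ((List.take_sublist _ _).mem hp)
        unfold pvLeP at hle
        by_cases hq : (p.2 == 1) = true
        · simp [hq]
        · have hq2 : p.2 ≠ 1 := by simpa using hq
          simp [hq]
          omega)]
    rw [pvCountP_take_eq (pvPlayers team1 team2) (n + 1) _ (by
      intro p hp hq
      simp only [Bool.and_eq_true, Bool.not_eq_true', beq_eq_false_iff_ne, ne_eq,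
        decide_eq_true_eq] at hq
      exact h2 p hp (by unfold pvLeP; omega))]
    exact pvK2 team1 team2 h
  unfold pvCnt
  rw [e1, e2]
  ring

-- the balance at the cut after all elements ≤lex (h,2), h ∈ team2
theorem pvBridgeA2 (team1 team2 : List Int) :
    ∀ h ∈ team2, ((pvCLe team1 h : Int) - (pvCLe team2 h : Int)) ∈ pvBals 0 (pvPlayers team1 team2) := by
  intro h hh
  have hpair := pvPlayers_pairwise team1 team2
  have hteams := pvPlayers_teams team1 team2
  have hc : ((h, (2 : Int)) : Int × Int) ∈ pvPlayers team1 team2 := by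
    apply (pvPlayers_perm team1 team2).mem_iff.mpr
    simp only [List.mem_append, List.mem_map]
    exact Or.inr ⟨h, hh, rfl⟩
  obtain ⟨n, hn, h1, h2⟩ := pvCut_exists (pvPlayers team1 team2) hpair (h, 2) ⟨_, hc, pvLeP_refl _⟩
  apply (pvBals_mem_iff (pvPlayers team1 team2) 0 _).mpr
  refine ⟨n, hn, ?_⟩
  have e1 : ((pvPlayers team1 team2).take (n + 1)).countP (fun p => p.2 == 1) = pvCLe team1 h := by
    rw [show ((pvPlayers team1 team2).take (n + 1)).countP (fun p => p.2 == 1) =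
        ((pvPlayers team1 team2).take (n + 1)).countP (fun p => p.2 == 1 && decide (p.1 ≤ h)) from
      List.countP_congr (by
        intro p hp
        have := h1 p hp
        unfold pvLeP at this
        by_cases hq : (p.2 == 1) = true <;> simp [hq] <;> omega)]
    rw [pvCountP_take_eq (pvPlayers team1 team2) (n + 1) _ (by
      intro p hp hq
      simp only [Bool.and_eq_true, beq_iff_eq, decide_eq_true_eq] at hq
      exact h2 p hp (by unfold pvLeP; omega))]
    exact pvK1 team1 team2 h
  have e2 : ((pvPlayers team1 team2).take (n + 1)).countP (fun p => !(p.2 == 1)) = pvCLe team2 h := by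
    rw [show ((pvPlayers team1 team2).take (n + 1)).countP (fun p => !(p.2 == 1)) =
        ((pvPlayers team1 team2).take (n + 1)).countP (fun p => !(p.2 == 1) && decide (p.1 ≤ h)) from
      List.countP_congr (by
        intro p hp
        have hle := h1 p hp
        unfold pvLeP at hle
        by_cases hq : (p.2 == 1) = true <;> simp [hq] <;> omega)]
    rw [pvCountP_take_eq (pvPlayers team1 team2) (n + 1) _ (by
      intro p hp hq
      simp only [Bool.and_eq_true, Bool.not_eq_true', beq_eq_false_iff_ne, ne_eq,
        decide_eq_true_eq] at hq
      have ht := hteams p ((List.drop_sublist _ _).mem hp)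
      exact h2 p hp (by unfold pvLeP; omega))]
    exact pvK3 team1 team2 h
  unfold pvCnt
  rw [e1, e2]
  ring

-- facts about a prefix ending at a team-1 player
theorem pvTag1_facts (team1 team2 : List Int) (n : Nat) (hn : n < (pvPlayers team1 team2).length)
    (h1 : (pvPlayers team1 team2)[n].2 = 1) :
    (pvPlayers team1 team2)[n].1 ∈ team1 ∧
    ((pvPlayers team1 team2).take (n + 1)).countP (fun p => !(p.2 == 1)) = pvCLt team2 (pvPlayers team1 team2)[n].1 ∧
    ((pvPlayers team1 team2).take (n + 1)).countP (fun p => p.2 == 1) ≤ pvCLe team1 (pvPlayers team1 team2)[n].1 ∧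
    pvCLt team1 (pvPlayers team1 team2)[n].1 ≤ ((pvPlayers team1 team2).take (n + 1)).countP (fun p => p.2 == 1) := by
  have hpair := pvPlayers_pairwise team1 team2
  have hteams := pvPlayers_teams team1 team2
  obtain ⟨hW1, hW2⟩ := pvSorted_take_drop (pvPlayers team1 team2) hpair n hn
  refine ⟨?_, ?_, ?_, ?_⟩
  · exact pvPlayers_tag1_mem team1 team2 _ (List.getElem_mem hn) h1
  · rw [show ((pvPlayers team1 team2).take (n + 1)).countP (fun p => !(p.2 == 1)) =
        ((pvPlayers team1 team2).take (n + 1)).countP (fun p => !(p.2 == 1) && decide (p.1 < (pvPlayers team1 team2)[n].1)) from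
      List.countP_congr (by
        intro p hp
        have hle := hW1 p hp
        have ht := hteams p ((List.take_sublist _ _).mem hp)
        unfold pvLeP at hle
        by_cases hq : (p.2 == 1) = true
        · simp [hq]
        · have hq2 : p.2 ≠ 1 := by simpa using hq
          simp [hq]
          omega)]
    rw [pvCountP_take_eq (pvPlayers team1 team2) (n + 1) _ (by
      intro p hp hq
      simp only [Bool.and_eq_true, Bool.not_eq_true', beq_eq_false_iff_ne, ne_eq,
        decide_eq_true_eq] at hq
      have := hW2 p hp
      unfold pvLeP at this
      omega)]
    exact pvK2 team1 team2 _
  · calc (((pvPlayers team1 team2).take (n + 1)).countP (fun p => p.2 == 1))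
        = ((pvPlayers team1 team2).take (n + 1)).countP (fun p => p.2 == 1 && decide (p.1 ≤ (pvPlayers team1 team2)[n].1)) :=
          List.countP_congr (by
            intro p hp
            have := hW1 p hp
            unfold pvLeP at this
            by_cases hq : (p.2 == 1) = true <;> simp [hq] <;> omega)
      _ ≤ (pvPlayers team1 team2).countP (fun p => p.2 == 1 && decide (p.1 ≤ (pvPlayers team1 team2)[n].1)) := pvCountP_take_le _ _ _
      _ = pvCLe team1 _ := pvK1 team1 team2 _
  · rw [← pvK4 team1 team2 (pvPlayers team1 team2)[n].1]
    rw [← pvCountP_take_eq (pvPlayers team1 team2) (n + 1) (fun p => p.2 == 1 && decide (p.1 < (pvPlayers team1 team2)[n].1)) (by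
      intro p hp hq
      simp only [Bool.and_eq_true, beq_iff_eq, decide_eq_true_eq] at hq
      have := hW2 p hp
      unfold pvLeP at this
      omega)]
    apply List.countP_mono_left
    intro p _ hq
    simp only [Bool.and_eq_true, beq_iff_eq, decide_eq_true_eq] at hq
    simp [hq.1]

-- facts about a prefix ending at a team-2 player
theorem pvTag2_facts (team1 team2 : List Int) (n : Nat) (hn : n < (pvPlayers team1 team2).length)
    (h2 : (pvPlayers team1 team2)[n].2 = 2) :
    (pvPlayers team1 team2)[n].1 ∈ team2 ∧
    ((pvPlayers team1 team2).take (n + 1)).countP (fun p => p.2 == 1) = pvCLe team1 (pvPlayers team1 team2)[n].1 ∧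
    ((pvPlayers team1 team2).take (n + 1)).countP (fun p => !(p.2 == 1)) ≤ pvCLe team2 (pvPlayers team1 team2)[n].1 ∧
    pvCLt team2 (pvPlayers team1 team2)[n].1 + 1 ≤ ((pvPlayers team1 team2).take (n + 1)).countP (fun p => !(p.2 == 1)) := by
  have hpair := pvPlayers_pairwise team1 team2
  have hteams := pvPlayers_teams team1 team2
  obtain ⟨hW1, hW2⟩ := pvSorted_take_drop (pvPlayers team1 team2) hpair n hn
  refine ⟨?_, ?_, ?_, ?_⟩
  · exact pvPlayers_tag2_mem team1 team2 _ (List.getElem_mem hn) h2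
  · rw [show ((pvPlayers team1 team2).take (n + 1)).countP (fun p => p.2 == 1) =
        ((pvPlayers team1 team2).take (n + 1)).countP (fun p => p.2 == 1 && decide (p.1 ≤ (pvPlayers team1 team2)[n].1)) from
      List.countP_congr (by
        intro p hp
        have := hW1 p hp
        unfold pvLeP at this
        by_cases hq : (p.2 == 1) = true <;> simp [hq] <;> omega)]
    rw [pvCountP_take_eq (pvPlayers team1 team2) (n + 1) _ (by
      intro p hp hq
      simp only [Bool.and_eq_true, beq_iff_eq, decide_eq_true_eq] at hq
      have := hW2 p hp
      unfold pvLeP at this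
      omega)]
    exact pvK1 team1 team2 _
  · calc (((pvPlayers team1 team2).take (n + 1)).countP (fun p => !(p.2 == 1)))
        = ((pvPlayers team1 team2).take (n + 1)).countP (fun p => !(p.2 == 1) && decide (p.1 ≤ (pvPlayers team1 team2)[n].1)) :=
          List.countP_congr (by
            intro p hp
            have := hW1 p hp
            unfold pvLeP at this
            by_cases hq : (p.2 == 1) = true <;> simp [hq] <;> omega)
      _ ≤ (pvPlayers team1 team2).countP (fun p => !(p.2 == 1) && decide (p.1 ≤ (pvPlayers team1 team2)[n].1)) := pvCountP_take_le _ _ _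
      _ = pvCLe team2 _ := pvK3 team1 team2 _
  · rw [List.take_succ_eq_append_getElem hn, List.countP_append]
    have hlast : List.countP (fun p => !(p.2 == 1)) [(pvPlayers team1 team2)[n]] = 1 := by
      simp [List.countP_cons, h2]
    rw [hlast]
    have hgoal : pvCLt team2 (pvPlayers team1 team2)[n].1 ≤ ((pvPlayers team1 team2).take n).countP (fun p => !(p.2 == 1)) := by
      rw [← pvK2 team1 team2 (pvPlayers team1 team2)[n].1]
      rw [← pvCountP_take_eq (pvPlayers team1 team2) n (fun p => !(p.2 == 1) && decide (p.1 < (pvPlayers team1 team2)[n].1)) (by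
        intro p hp hq
        simp only [Bool.and_eq_true, Bool.not_eq_true', beq_eq_false_iff_ne, ne_eq,
          decide_eq_true_eq] at hq
        rw [List.drop_eq_getElem_cons hn] at hp
        rcases List.mem_cons.mp hp with heq | hp2
        · rw [heq] at hq
          omega
        · have := hW2 p hp2
          unfold pvLeP at this
          omega)]
      apply List.countP_mono_left
      intro p _ hq
      simp only [Bool.and_eq_true] at hq
      exact hq.1
    omega

-- Hall bound on team-1 heights forces every balance of the sorted list to be ≤ 0
theorem pvBridgeB (team1 team2 : List Int)
    (hyp : ∀ h ∈ team1, pvCLe team1 h ≤ pvCLt team2 h) :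
    ∀ b ∈ pvBals 0 (pvPlayers team1 team2), b ≤ 0 := by
  intro b hb
  obtain ⟨n, hn, hbv⟩ := (pvBals_mem_iff _ 0 b).mp hb
  rcases pvPlayers_teams team1 team2 _ (List.getElem_mem hn) with h1 | h2
  · obtain ⟨hmem, he2, he1, _⟩ := pvTag1_facts team1 team2 n hn h1
    have := hyp _ hmem
    rw [hbv]
    unfold pvCnt
    omega
  · obtain ⟨hmem, he1, _, he2⟩ := pvTag2_facts team1 team2 n hn h2
    rcases pvCle_all team1 team2 hyp (pvPlayers team1 team2)[n].1 with hc | hc <;>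
    · rw [hbv]
      unfold pvCnt
      omega

-- a negative balance yields a team-2 height where team 2 outnumbers team 1
theorem pvBridgeC (team1 team2 : List Int)
    (hex : ∃ b ∈ pvBals 0 (pvPlayers team1 team2), b < 0) :
    ∃ h ∈ team2, pvCLe team1 h < pvCLe team2 h := by
  obtain ⟨b, hb, hblt⟩ := hex
  obtain ⟨n, hn, hbv⟩ := (pvBals_mem_iff _ 0 b).mp hb
  rcases pvPlayers_teams team1 team2 _ (List.getElem_mem hn) with h1 | h2
  · -- prefix ends at a team-1 player: transfer to the largest team-2 height below it
    obtain ⟨hmem, he2, _, he1⟩ := pvTag1_facts team1 team2 n hn h1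
    have hcnt : pvCLt team1 (pvPlayers team1 team2)[n].1 < pvCLt team2 (pvPlayers team1 team2)[n].1 := by
      rw [hbv] at hblt
      unfold pvCnt at hblt
      omega
    have hne : ∃ y ∈ team2, y < (pvPlayers team1 team2)[n].1 := by
      have hpos : 0 < pvCLt team2 (pvPlayers team1 team2)[n].1 := by omega
      unfold pvCLt at hpos
      obtain ⟨y, hy, hyP⟩ := List.countP_pos_iff.mp hpos
      exact ⟨y, hy, by simpa using hyP⟩
    obtain ⟨y0, hy0m, hy0lt, hmax⟩ := pvExists_max team2 (· < (pvPlayers team1 team2)[n].1) hne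
    refine ⟨y0, hy0m, ?_⟩
    have e1 : pvCLe team1 y0 ≤ pvCLt team1 (pvPlayers team1 team2)[n].1 := by
      unfold pvCLe pvCLt
      apply List.countP_mono_left
      intro a _ ha
      simp only [decide_eq_true_eq] at *
      omega
    have e2 : pvCLt team2 (pvPlayers team1 team2)[n].1 ≤ pvCLe team2 y0 := by
      unfold pvCLe pvCLt
      apply List.countP_mono_left
      intro a ha haP
      simp only [decide_eq_true_eq] at *
      exact hmax a ha haP
    omega
  · obtain ⟨hmem, he1, he2, _⟩ := pvTag2_facts team1 team2 n hn h2
    refine ⟨(pvPlayers team1 team2)[n].1, hmem, ?_⟩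
    rw [hbv] at hblt
    unfold pvCnt at hblt
    omega

-- a zero balance (under the Hall bound) is attained at a team-1 cut with equality
theorem pvBridgeD (team1 team2 : List Int)
    (h0 : (0 : Int) ∈ pvBals 0 (pvPlayers team1 team2))
    (hyp : ∀ h ∈ team1, pvCLe team1 h ≤ pvCLt team2 h) :
    ∃ h ∈ team1, pvCLe team1 h = pvCLt team2 h := by
  obtain ⟨n, hn, hbv⟩ := (pvBals_mem_iff _ 0 0).mp h0
  rcases pvPlayers_teams team1 team2 _ (List.getElem_mem hn) with h1 | h2
  · obtain ⟨hmem, he2, he1, _⟩ := pvTag1_facts team1 team2 n hn h1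
    refine ⟨(pvPlayers team1 team2)[n].1, hmem, ?_⟩
    have := hyp _ hmem
    unfold pvCnt at hbv
    omega
  · obtain ⟨hmem, he1, _, he2⟩ := pvTag2_facts team1 team2 n hn h2
    rcases pvCle_all team1 team2 hyp (pvPlayers team1 team2)[n].1 with hc | hc <;>
    · exfalso
      unfold pvCnt at hbv
      omega

-- the full case analysis, shared by the verdict theorems
theorem pv_main (team1 team2 : List Int) :
    (¬ D_photographable team1 team2 → photographable team1 team2 = photographable_alt team1 team2) ∧
    (D_photographable team1 team2 → photographable team1 team2 = (false, 0) ∧ photographable_alt team1 team2 = (true, 2)) := by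
  have hD_eq : D_photographable team1 team2 =
      ((∃ h ∈ team2, pvCLe team1 h < pvCLe team2 h) ∧
       (∀ h ∈ team1, pvCLe team1 h ≤ pvCLt team2 h) ∧
       (∃ h ∈ team1, pvCLe team1 h = pvCLt team2 h)) := rfl
  have hBeq : photographable_alt team1 team2 =
      (if 0 ≤ ((pvPlayers team1 team2).foldl pvStep (0,0,0)).2.1 then ((true : Bool), (1 : Int))
       else if ((pvPlayers team1 team2).foldl pvStep (0,0,0)).2.2 ≤ 0 then (true, 2) else (false, 0)) := rfl
  have hteams : ∀ p ∈ pvPlayers team1 team2, p.2 = 1 ∨ p.2 = 2 := pvPlayers_teams team1 team2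
  by_cases hpos : ∀ b ∈ pvBals 0 (pvPlayers team1 team2), (0 : Int) ≤ b
  · -- trial 1 succeeds in both
    obtain ⟨v, hA⟩ := pvInner1_ok (pvPlayers team1 team2) 0 0 (le_refl 0) (by intro b hb; have := hpos b hb; omega)
    have hmn : 0 ≤ ((pvPlayers team1 team2).foldl pvStep (0,0,0)).2.1 :=
      (pvFold_mn_iff (pvPlayers team1 team2) 0 0 0 0).mpr ⟨le_refl 0, hpos⟩
    have hAe : photographable team1 team2 = (true, 1) := by
      show (match pvInner (pvPlayers team1 team2) 1 0 with
            | (false, _) => ((true : Bool), (1 : Int))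
            | (true, left) =>
              match pvInner (pvPlayers team1 team2) 2 left with
              | (false, _) => (true, 2)
              | (true, _) => (false, 0)) = (true, 1)
      rw [hA]
    have hBe : photographable_alt team1 team2 = (true, 1) := by rw [hBeq, if_pos hmn]
    constructor
    · intro _; rw [hAe, hBe]
    · intro hD
      rw [hD_eq] at hD
      exfalso
      obtain ⟨⟨h, hh, hlt⟩, _, _⟩ := hD
      have := hpos _ (pvBridgeA2 team1 team2 h hh)
      omega
  · -- trial 1 breaks with left = -1 in A; mn < 0 in B
    push_neg at hpos
    obtain ⟨x0, hx0, hx0lt⟩ := hpos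
    have hA1 : pvInner (pvPlayers team1 team2) 1 0 = (true, -1) :=
      pvInner1_break (pvPlayers team1 team2) 0 0 (le_refl 0) ⟨x0, hx0, by omega⟩
    have hmn : ¬ 0 ≤ ((pvPlayers team1 team2).foldl pvStep (0,0,0)).2.1 := by
      intro hc
      have := ((pvFold_mn_iff (pvPlayers team1 team2) 0 0 0 0).mp hc).2 x0 hx0
      omega
    have hAe : photographable team1 team2 =
        (match pvInner (pvPlayers team1 team2) 2 (-1) with
         | (false, _) => ((true : Bool), (2 : Int))
         | (true, _) => (false, 0)) := by
      show (match pvInner (pvPlayers team1 team2) 1 0 with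
            | (false, _) => ((true : Bool), (1 : Int))
            | (true, left) =>
              match pvInner (pvPlayers team1 team2) 2 left with
              | (false, _) => (true, 2)
              | (true, _) => (false, 0)) = _
      rw [hA1]
    have h2iff := pvInner2_iff (pvPlayers team1 team2) 0 (-1) hteams
    by_cases hneg1 : ∀ b ∈ pvBals 0 (pvPlayers team1 team2), b ≤ (-1 : Int)
    · -- A returns (true,2); B too
      have h2 : (pvInner (pvPlayers team1 team2) 2 (-1)).1 = false := h2iff.mpr (by intro b hb; have := hneg1 b hb; omega)
      have hmx : ((pvPlayers team1 team2).foldl pvStep (0,0,0)).2.2 ≤ 0 :=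
        (pvFold_mx_iff (pvPlayers team1 team2) 0 0 0 0).mpr ⟨le_refl 0, by intro b hb; have := hneg1 b hb; omega⟩
      have hAe2 : photographable team1 team2 = (true, 2) := by
        rw [hAe]
        rcases hh : pvInner (pvPlayers team1 team2) 2 (-1) with ⟨f, v⟩
        rw [hh] at h2; subst h2; rfl
      have hBe : photographable_alt team1 team2 = (true, 2) := by
        rw [hBeq, if_neg hmn, if_pos hmx]
      constructor
      · intro _; rw [hAe2, hBe]
      · intro hD
        rw [hD_eq] at hD
        exfalso
        obtain ⟨_, _, h, hh1, heq⟩ := hD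
        have := hneg1 _ (pvBridgeA team1 team2 h hh1)
        omega
    · -- A returns (false,0)
      push_neg at hneg1
      obtain ⟨y0, hy0, hy0gt⟩ := hneg1
      have h2 : ¬ (pvInner (pvPlayers team1 team2) 2 (-1)).1 = false := by
        intro hc
        have := h2iff.mp hc y0 hy0
        omega
      have hAe2 : photographable team1 team2 = (false, 0) := by
        rw [hAe]
        rcases hh : pvInner (pvPlayers team1 team2) 2 (-1) with ⟨f, v⟩
        rw [hh] at h2
        cases f
        · exact absurd rfl h2
        · rfl
      by_cases hle0 : ∀ b ∈ pvBals 0 (pvPlayers team1 team2), b ≤ (0 : Int)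
      · -- D_ holds: B returns (true,2)
        have hy00 : y0 = 0 := by have := hle0 y0 hy0; omega
        have hii : ∀ h ∈ team1, pvCLe team1 h ≤ pvCLt team2 h := by
          intro h hh
          have := hle0 _ (pvBridgeA team1 team2 h hh)
          omega
        have hD : D_photographable team1 team2 := by
          rw [hD_eq]
          refine ⟨?_, hii, ?_⟩
          · exact pvBridgeC team1 team2 ⟨x0, hx0, hx0lt⟩
          · exact pvBridgeD team1 team2 (hy00 ▸ hy0) hii
        have hmx : ((pvPlayers team1 team2).foldl pvStep (0,0,0)).2.2 ≤ 0 :=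
          (pvFold_mx_iff (pvPlayers team1 team2) 0 0 0 0).mpr ⟨le_refl 0, hle0⟩
        have hBe : photographable_alt team1 team2 = (true, 2) := by
          rw [hBeq, if_neg hmn, if_pos hmx]
        exact ⟨fun hnD => absurd hD hnD, fun _ => ⟨hAe2, hBe⟩⟩
      · -- B returns (false,0) too; D_ fails
        push_neg at hle0
        obtain ⟨z0, hz0, hz0gt⟩ := hle0
        have hmx : ¬ ((pvPlayers team1 team2).foldl pvStep (0,0,0)).2.2 ≤ 0 := by
          intro hc
          have := ((pvFold_mx_iff (pvPlayers team1 team2) 0 0 0 0).mp hc).2 z0 hz0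
          omega
        have hBe : photographable_alt team1 team2 = (false, 0) := by
          rw [hBeq, if_neg hmn, if_neg hmx]
        constructor
        · intro _; rw [hAe2, hBe]
        · intro hD
          rw [hD_eq] at hD
          exfalso
          have := pvBridgeB team1 team2 hD.2.1 z0 hz0
          omega

-- ===== VERDICT (by name: the statement is the Claim_ definition above) =====
theorem photographable_spec : Claim_unchanged_photographable := by
  intro team1 team2 _ hnD
  exact (pv_main team1 team2).1 hnD

theorem photographable_changed : Claim_changed_photographable := by
  unfold Claim_changed_photographable; decide

theorem photographable_tight : Claim_exact_photographable := by
  intro team1 team2 _ hD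
  obtain ⟨hA, hB⟩ := (pv_main team1 team2).2 hD
  rw [hA, hB]
  simp
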